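-- pv_equiv track=rewrite | github.com/Liraz-Benbenishti/Python-Code-I-Wrote | hangman/hangman/hangman-unit7/hangman-ex7.2.7.py | arrow
-- ===== SOURCE A (Python) =====
-- def arrow(my_char, max_length):
-- 	"""
-- 	:param my_char: Single char.
-- 	:param max_length: Maximum size.
-- 	:type my_char: string
-- 	:type max_length: int
-- 	:return: returns a string that symbolize a structure of an arrow, built from the input char, the middle of the arrow is of length of the input max_length.
-- 	rtype: string
-- 	"""
-- 	string_list = []
-- 	for i in range(1, max_length+1, 1):
-- 		for j in range(0, i, 1):
-- 			string_list.append(my_char + " ")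
-- 		string_list.append("\n")
--
-- 	for i in range(max_length-1, 0, -1):
-- 		for j in range(0, i, 1):
-- 			string_list.append(my_char + " ")
-- 		string_list.append("\n")
-- 	return "".join(string_list)
-- ===== SOURCE B (Python) =====
-- def arrow(my_char, max_length):
--     token = my_char + " "
--     return "".join(token * (max_length - abs(max_length - r)) + "\n"
--                    for r in range(1, 2 * max_length))
-- ===== Notes on version B (the rewrite author's own statement) =====
-- stated objective: simpler
-- what changed: Replaces A's two staged nested loops (ascending then descending) with a single pass over all 2n-1 rows whose width is the closed form n - |n - r|, each row built by string repetition.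
import Mathlib
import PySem

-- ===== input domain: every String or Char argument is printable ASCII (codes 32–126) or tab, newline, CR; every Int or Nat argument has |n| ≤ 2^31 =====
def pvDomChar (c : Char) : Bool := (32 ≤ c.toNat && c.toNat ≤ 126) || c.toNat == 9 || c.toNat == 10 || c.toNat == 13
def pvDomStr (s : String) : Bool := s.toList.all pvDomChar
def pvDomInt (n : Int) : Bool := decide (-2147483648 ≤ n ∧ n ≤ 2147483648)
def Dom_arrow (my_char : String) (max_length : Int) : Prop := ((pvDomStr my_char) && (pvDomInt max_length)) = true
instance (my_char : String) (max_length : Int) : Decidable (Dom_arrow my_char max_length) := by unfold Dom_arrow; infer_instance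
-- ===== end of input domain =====

-- B replaces A's two staged nested loops with a single pass over all 2n-1 rows,
-- computing each row's width by the closed form n - |n - r|; objective: simpler.

-- ===== PORT A =====
def arrow (my_char : String) (max_length : Int) : String :=
  -- first loop: for i in range(1, max_length+1): for j in range(0, i): append(my_char+" "); append("\n")
  let sl1 : List String :=
    (PySem.List.pyRange 1 (max_length + 1) 1).foldl (fun acc i =>
      ((PySem.List.pyRange 0 i 1).foldl (fun a _ => a ++ [my_char ++ " "]) acc) ++ ["\n"]) []
  -- second loop: for i in range(max_length-1, 0, -1): same body
  let sl2 : List String :=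
    (PySem.List.pyRange (max_length - 1) 0 (-1)).foldl (fun acc i =>
      ((PySem.List.pyRange 0 i 1).foldl (fun a _ => a ++ [my_char ++ " "]) acc) ++ ["\n"]) sl1
  PySem.Str.join "" sl2

-- ===== PORT B =====
-- hand port of Python 's * n' (exact: n ≤ 0 gives ""): n copies of s joined
def pyStrMul (s : String) (n : Int) : String :=
  PySem.Str.join "" (List.replicate n.toNat s)

def arrow_alt (my_char : String) (max_length : Int) : String :=
  let token := my_char ++ " "
  PySem.Str.join ""
    ((PySem.List.pyRange 1 (2 * max_length) 1).map (fun r =>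
      pyStrMul token (max_length - |max_length - r|) ++ "\n"))

-- ===== PRECONDITION & SPEC =====
def Spec_arrow (my_char : String) (max_length : Int) (out : String) : Prop := out = arrow_alt my_char max_length
instance (my_char : String) (max_length : Int) (out : String) : Decidable (Spec_arrow my_char max_length out) := by unfold Spec_arrow; infer_instance

-- ===== CLAIM (what is proved, stated in full; the proofs are below) =====
def Claim_equal_arrow : Prop := ∀ (my_char : String) (max_length : Int), Dom_arrow my_char max_length → Spec_arrow my_char max_length (arrow my_char max_length)

-- ===== LEMMAS AND PROOFS =====

lemma join_empty_sep (ps : List (List Char)) : PySem.Chars.join [] ps = ps.flatten := by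
  induction ps with
  | nil => simp [PySem.Chars.join_nil]
  | cons p ps ih =>
    cases ps with
    | nil => simp [PySem.Chars.join_singleton]
    | cons q qs => simp [PySem.Chars.join_cons_cons] at ih ⊢; simp [ih]

lemma toList_join_empty (parts : List String) :
    (PySem.Str.join "" parts).toList = (parts.map String.toList).flatten := by
  rw [PySem.Str.toList_join]
  have : ("" : String).toList = [] := by decide
  rw [this, join_empty_sep]

-- the inner 'for j in range(0, i)' loop appends one token per iteration
lemma foldl_const_append {α β : Type} (l : List α) (x : β) (acc : List β) :
    l.foldl (fun a _ => a ++ [x]) acc = acc ++ List.replicate l.length x := by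
  induction l generalizing acc with
  | nil => simp
  | cons h t ih => simp [List.foldl, ih, List.replicate_succ]

-- one iteration of either of A's outer loops contributes this chunk of tokens
lemma outer_body (c : String) (acc : List String) (i : Int) :
    ((PySem.List.pyRange 0 i 1).foldl (fun a _ => a ++ [c ++ " "]) acc) ++ ["\n"]
      = acc ++ (List.replicate i.toNat (c ++ " ") ++ ["\n"]) := by
  rw [foldl_const_append]
  simp [PySem.List.length_pyRange_one]

-- B's row list of widths equals A's ascending-then-descending index lists
lemma width_map (m : Int) :
    (PySem.List.pyRange 1 (2 * m) 1).map (fun r => m - |m - r|)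
      = PySem.List.pyRange 1 (m + 1) 1 ++ PySem.List.pyRange (m - 1) 0 (-1) := by
  by_cases hm : 1 ≤ m
  · rw [PySem.List.pyRange_one_append 1 (m + 1) (2 * m) (by omega) (by omega)]
    rw [List.map_append]
    congr 1
    · calc (PySem.List.pyRange 1 (m + 1) 1).map (fun r => m - |m - r|)
          = (PySem.List.pyRange 1 (m + 1) 1).map id := by
            apply List.map_congr_left
            intro r hr
            rw [PySem.List.mem_pyRange_one] at hr
            simp only [id]
            have : |m - r| = m - r := abs_of_nonneg (by omega)
            omega
        _ = _ := List.map_id _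
    · rw [PySem.List.pyRange_one, PySem.List.pyRange_neg_one, List.map_map]
      have hlen : (2 * m - (m + 1)).toNat = (m - 1 - 0).toNat := by omega
      rw [hlen]
      apply List.map_congr_left
      intro k hk
      rw [List.mem_range] at hk
      have hk' : (k : Int) < m - 1 := by
        have := hk
        omega
      simp only [Function.comp]
      have : |m - (m + 1 + (k : Int))| = 1 + k := by
        rw [abs_of_nonpos (by omega)]; ring
      rw [this]; ring
  · have e1 : PySem.List.pyRange 1 (2 * m) 1 = [] := PySem.List.pyRange_one_eq_nil (by omega)
    have e2 : PySem.List.pyRange 1 (m + 1) 1 = [] := PySem.List.pyRange_one_eq_nil (by omega)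
    have e3 : PySem.List.pyRange (m - 1) 0 (-1) = [] := PySem.List.pyRange_neg_one_eq_nil (by omega)
    rw [e1, e2, e3]; rfl

-- a row of B, as a character list, is the flattened token chunk of A
lemma row_chars (c : String) (i : Int) :
    (pyStrMul (c ++ " ") i ++ "\n").toList
      = ((List.replicate i.toNat (c ++ " ") ++ ["\n"]).map String.toList).flatten := by
  rw [String.toList_append, pyStrMul, toList_join_empty]
  simp

lemma halves (c : String) (l : List Int) :
    ((l.flatMap (fun i => List.replicate i.toNat (c ++ " ") ++ ["\n"])).map String.toList).flatten
      = ((l.map (fun i => pyStrMul (c ++ " ") i ++ "\n")).map String.toList).flatten := by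
  induction l with
  | nil => simp
  | cons h t ih =>
    simp only [List.flatMap_cons, List.map_cons, List.map_append, List.flatten_append,
      List.flatten_cons, row_chars, ih]

theorem arrow_eq_alt (c : String) (m : Int) : arrow c m = arrow_alt c m := by
  rw [← String.toList_inj]
  unfold arrow arrow_alt
  have hchunk : ∀ (l : List Int) (acc : List String),
      l.foldl (fun acc i =>
        ((PySem.List.pyRange 0 i 1).foldl (fun a _ => a ++ [c ++ " "]) acc) ++ ["\n"]) acc
      = acc ++ l.flatMap (fun i => List.replicate i.toNat (c ++ " ") ++ ["\n"]) := by
    intro l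
    induction l with
    | nil => intro acc; simp
    | cons h t ih =>
      intro acc
      simp only [List.foldl, List.flatMap_cons]
      rw [outer_body, ih]
      simp
  simp only [hchunk]
  rw [toList_join_empty, toList_join_empty]
  have hB : (PySem.List.pyRange 1 (2 * m) 1).map (fun r => pyStrMul (c ++ " ") (m - |m - r|) ++ "\n")
      = ((PySem.List.pyRange 1 (2 * m) 1).map (fun r => m - |m - r|)).map
          (fun i => pyStrMul (c ++ " ") i ++ "\n") := by
    rw [List.map_map]; rfl
  rw [hB, width_map]
  rw [← halves]
  simp [List.flatMap_append]

-- ===== VERDICT (by name: the statement is the Claim_ definition above) =====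
theorem arrow_spec : Claim_equal_arrow := by
  intro c m _
  exact arrow_eq_alt c m
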